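-- pv_equiv track=rewrite | github.com/Mitelin/SpacehamstersBACKEND | tests/test_google_scripts_contract.py | _path_to_sample
-- ===== SOURCE A (Python) =====
-- def _path_to_sample(path: str) -> str:
--     """Normalize a path by replacing numeric runs with '1'."""
--     out: list[str] = []
--     i = 0
--     while i < len(path):
--         if path[i].isdigit():
--             j = i
--             while j < len(path) and path[j].isdigit():
--                 j += 1
--             out.append("1")
--             i = j
--             continue
--         out.append(path[i])
--         i += 1
--     return "".join(out)
-- ===== SOURCE B (Python) =====
-- def _path_to_sample(path: str) -> str:
--     """Normalize a path by replacing numeric runs with '1'."""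
--     # Stage 1: translate every digit to the canonical digit '1'.
--     mapped = ['1' if ch.isdigit() else ch for ch in path]
--     # Stage 2: collapse adjacent '1's (correct because '1' itself is a digit,
--     # so every '1' in `mapped` came from a digit and adjacent '1's came from
--     # one maximal digit run).
--     out = []
--     prev = None
--     for ch in mapped:
--         if ch != '1' or prev != '1':
--             out.append(ch)
--         prev = ch
--     return ''.join(out)
-- ===== Notes on version B (the rewrite author's own statement) =====
-- stated objective: alternative
-- what changed: Instead of scanning out maximal digit runs with nested index loops, B first translates every digit to the canonical digit and then collapses adjacent copies of it in a second pass that only remembers the previous character; it never locates run boundaries, relying on the canonical replacement character itself being a digit.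
import Mathlib
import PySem

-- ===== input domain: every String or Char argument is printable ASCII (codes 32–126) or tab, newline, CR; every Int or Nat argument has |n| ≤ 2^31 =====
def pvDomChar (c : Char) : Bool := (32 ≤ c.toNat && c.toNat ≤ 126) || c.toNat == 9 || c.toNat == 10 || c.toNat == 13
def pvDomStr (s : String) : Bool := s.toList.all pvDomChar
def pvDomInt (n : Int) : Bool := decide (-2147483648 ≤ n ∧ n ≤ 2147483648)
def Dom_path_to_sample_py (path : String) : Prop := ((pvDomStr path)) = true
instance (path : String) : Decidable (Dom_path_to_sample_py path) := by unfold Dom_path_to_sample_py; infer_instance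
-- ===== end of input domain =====

-- B is a two-stage rewrite: map every digit to '1', then collapse adjacent '1's;
-- it never finds run boundaries (objective: alternative, same cost).

-- ===== PORT A =====
-- inner while loop: advance j while path[j].isdigit()
def pvDropDigits : List Char → List Char
  | [] => []
  | c :: rest => if PySem.Chars.isdigit c then pvDropDigits rest else c :: rest

theorem pvDropDigits_length_le (l : List Char) : (pvDropDigits l).length ≤ l.length := by
  induction l with
  | nil => simp [pvDropDigits]
  | cons c rest ih =>
    simp only [pvDropDigits]
    split
    · exact Nat.le_succ_of_le ih
    · simp

-- outer while loop over the characters, accumulating `out`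
def pvGoA : List Char → List Char
  | [] => []
  | c :: rest =>
    if PySem.Chars.isdigit c then '1' :: pvGoA (pvDropDigits rest)
    else c :: pvGoA rest
termination_by l => l.length
decreasing_by
  · exact Nat.lt_succ_of_le (pvDropDigits_length_le rest)
  · exact Nat.lt_succ_self _

def path_to_sample_py (path : String) : String := String.ofList (pvGoA path.toList)

-- ===== PORT B =====
-- stage 1: ['1' if ch.isdigit() else ch for ch in path]
def pvMapB (c : Char) : Char := if PySem.Chars.isdigit c then '1' else c

-- stage 2: the for loop with `prev` (Python's prev=None ↦ none)
def pvDedupB : Option Char → List Char → List Char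
  | _, [] => []
  | prev, c :: rest =>
    if c ≠ '1' ∨ prev ≠ some '1' then c :: pvDedupB (some c) rest
    else pvDedupB (some c) rest

def path_to_sample_py_alt (path : String) : String :=
  String.ofList (pvDedupB none (path.toList.map pvMapB))

-- ===== PRECONDITION & SPEC =====
def Spec_path_to_sample_py (path : String) (out : String) : Prop := out = path_to_sample_py_alt path
instance (path : String) (out : String) : Decidable (Spec_path_to_sample_py path out) := by unfold Spec_path_to_sample_py; infer_instance

-- ===== CLAIM (what is proved, stated in full; the proofs are below) =====
def Claim_equal_path_to_sample_py : Prop := ∀ (path : String), Dom_path_to_sample_py path → Spec_path_to_sample_py path (path_to_sample_py path)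

-- ===== LEMMAS AND PROOFS =====

theorem pvDropDigits_eq_dropWhile (l : List Char) :
    pvDropDigits l = l.dropWhile PySem.Chars.isdigit := by
  induction l with
  | nil => rfl
  | cons c rest ih =>
    simp only [pvDropDigits, List.dropWhile]
    split_ifs with h <;> simp [h, ih]

theorem pvIsdigit_one : PySem.Chars.isdigit '1' = true := by decide

-- the key invariant: B's state (prev = '1') corresponds to A being inside a digit run
theorem pvKey (l : List Char) : ∀ (p : Option Char),
    pvDedupB p (l.map pvMapB) =
      pvGoA (if p = some '1' then l.dropWhile PySem.Chars.isdigit else l) := by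
  induction l with
  | nil => intro p; split <;> simp [pvDedupB, pvGoA]
  | cons c rest ih =>
    intro p
    by_cases h : PySem.Chars.isdigit c
    · have hc : pvMapB c = '1' := by simp [pvMapB, h]
      by_cases hp : p = some '1'
      · subst hp
        simp only [List.map_cons, hc, pvDedupB, List.dropWhile, h]
        rw [if_neg (by simp)]
        simpa using ih (some '1')
      · simp only [List.map_cons, hc, pvDedupB, if_neg hp]
        rw [if_pos (Or.inr hp)]
        have : pvGoA (c :: rest) = '1' :: pvGoA (rest.dropWhile PySem.Chars.isdigit) := by
          rw [pvGoA, if_pos h, pvDropDigits_eq_dropWhile]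
        rw [this]
        exact congrArg ('1' :: ·) (by simpa using ih (some '1'))
    · have hc : pvMapB c = c := by simp [pvMapB, h]
      have hne : c ≠ '1' := fun e => h (e ▸ pvIsdigit_one)
      have hrhs : (if p = some '1' then (c :: rest).dropWhile PySem.Chars.isdigit
          else c :: rest) = c :: rest := by
        split
        · simp [List.dropWhile, h]
        · rfl
      rw [hrhs]
      simp only [List.map_cons, hc, pvDedupB, if_pos (Or.inl hne)]
      rw [pvGoA, if_neg h]
      refine congrArg (c :: ·) ?_
      have := ih (some c)
      rwa [if_neg (by simpa using hne)] at this

-- ===== VERDICT (by name: the statement is the Claim_ definition above) =====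
theorem path_to_sample_py_spec : Claim_equal_path_to_sample_py := by
  intro path _
  unfold Spec_path_to_sample_py path_to_sample_py path_to_sample_py_alt
  rw [pvKey path.toList none, if_neg (by simp)]
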